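-- pv_equiv track=rewrite | github.com/bubblerrrr/cheetshit | 取石子.py | qushizi
-- ===== SOURCE A (Python) =====
-- def qushizi(a, b, turn):
--     if a == 0 or b == 0:
--         return turn
--     if a == b:
--         return turn
--     if b > a:
--         a, b = b, a
--     if a // b >= 2:
--         return turn
--
--     for i in range(1, a // b + 1):
--         if qushizi(a - i * b, b, turn ^ 1) == turn:
--             return turn
--     return turn ^ 1
-- ===== SOURCE B (Python) =====
-- def qushizi(a, b, turn):
--     # Iterative: the recursive win/loss inversion collapses to returning the
--     # turn value reached at the terminating guard, toggling turn each subtraction.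
--     while True:
--         if a == 0 or b == 0 or a == b:
--             return turn
--         if b > a:
--             a, b = b, a
--         q = a // b
--         if q >= 2:
--             return turn
--         if q <= 0:
--             return turn ^ 1
--         a, turn = a - b, turn ^ 1
-- ===== Notes on version B (the rewrite author's own statement) =====
-- stated objective: simpler
-- what changed: Replaces A's recursion (whose win/loss inversion over the single-iteration range loop collapses to returning the base-case turn value) with a flat iterative loop that subtracts b and toggles turn each step.
import Mathlib
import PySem

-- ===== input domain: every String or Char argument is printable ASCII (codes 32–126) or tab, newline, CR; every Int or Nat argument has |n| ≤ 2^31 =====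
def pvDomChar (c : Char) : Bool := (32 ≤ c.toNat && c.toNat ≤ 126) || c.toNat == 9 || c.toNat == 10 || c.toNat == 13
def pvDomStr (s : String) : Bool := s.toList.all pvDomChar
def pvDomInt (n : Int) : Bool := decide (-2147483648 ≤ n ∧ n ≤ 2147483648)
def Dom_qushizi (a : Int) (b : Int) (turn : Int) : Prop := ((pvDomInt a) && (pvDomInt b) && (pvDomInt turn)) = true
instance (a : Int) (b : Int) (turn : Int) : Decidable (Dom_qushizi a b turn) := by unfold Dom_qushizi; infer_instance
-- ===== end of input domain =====

-- B replaces A's recursion (whose win/loss inversion collapses to returning the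
-- base-case turn) by a plain iterative loop toggling turn each subtraction; objective: simpler.

-- ===== PORT A =====
-- the 'for i in range(1, a//b+1)' loop with its early return, taking the recursive
-- call as a function argument (Python recursion is ported with fuel; the fuel
-- |a|+|b|+1 is never exhausted, since each recursive call strictly shrinks |a|+|b|)
def qushiziGo (rec : Int → Int → Int → Int) (l : List Int) (a b turn : Int) : Int :=
  match l with
  | [] => PySem.Int.bxor turn 1
  | i :: rest =>
      if rec (a - i * b) b (PySem.Int.bxor turn 1) = turn then turn
      else qushiziGo rec rest a b turn

def qushiziF : Nat → Int → Int → Int → Int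
  | 0, _, _, turn => turn
  | fuel + 1, a, b, turn =>
      if a = 0 ∨ b = 0 then turn
      else if a = b then turn
      else
        let p := if b > a then (b, a) else (a, b)
        if PySem.Int.floordiv p.1 p.2 ≥ 2 then turn
        else qushiziGo (qushiziF fuel)
              (PySem.List.pyRange 1 (PySem.Int.floordiv p.1 p.2 + 1) 1) p.1 p.2 turn

def qushizi (a : Int) (b : Int) (turn : Int) : Int :=
  qushiziF (a.natAbs + b.natAbs + 1) a b turn

-- ===== PORT B =====
def qushiziIter : Nat → Int → Int → Int → Int
  | 0, _, _, turn => turn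
  | fuel + 1, a, b, turn =>
      if a = 0 ∨ b = 0 ∨ a = b then turn
      else
        let p := if b > a then (b, a) else (a, b)
        let q := PySem.Int.floordiv p.1 p.2
        if q ≥ 2 then turn
        else if q ≤ 0 then PySem.Int.bxor turn 1
        else qushiziIter fuel (p.1 - p.2) p.2 (PySem.Int.bxor turn 1)

def qushizi_alt (a : Int) (b : Int) (turn : Int) : Int :=
  qushiziIter (a.natAbs + b.natAbs + 1) a b turn

-- ===== PRECONDITION & SPEC =====
def Spec_qushizi (a : Int) (b : Int) (turn : Int) (out : Int) : Prop := out = qushizi_alt a b turn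
instance (a : Int) (b : Int) (turn : Int) (out : Int) : Decidable (Spec_qushizi a b turn out) := by unfold Spec_qushizi; infer_instance

-- ===== CLAIM (what is proved, stated in full; the proofs are below) =====
def Claim_equal_qushizi : Prop := ∀ (a : Int) (b : Int) (turn : Int), Dom_qushizi a b turn → Spec_qushizi a b turn (qushizi a b turn)

-- ===== LEMMAS AND PROOFS =====

-- Python's `t ^ 1` is an involution …
lemma bxor_one_bxor_one (t : Int) : PySem.Int.bxor (PySem.Int.bxor t 1) 1 = t := by
  by_cases h : 0 ≤ t
  · have h1 : PySem.Int.bxor t 1 = ((t.toNat ^^^ 1 : Nat) : Int) := by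
      simp [PySem.Int.bxor, h]
    rw [h1]
    have h2 : (0:Int) ≤ ((t.toNat ^^^ 1 : Nat) : Int) := Int.natCast_nonneg _
    simp [PySem.Int.bxor, h2, Int.toNat_of_nonneg h]
  · have h1 : PySem.Int.bxor t 1 = -(((-t - 1).toNat ^^^ 1 : Nat) : Int) - 1 := by
      simp [PySem.Int.bxor, h]
    rw [h1]
    have h2 : ¬ (0:Int) ≤ -(((-t - 1).toNat ^^^ 1 : Nat) : Int) - 1 := by
      have := Int.natCast_nonneg ((-t - 1).toNat ^^^ 1); omega
    simp [PySem.Int.bxor]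
    omega

-- … and never fixes t.
lemma nat_xor_one_ne (n : Nat) : n ^^^ 1 ≠ n := by
  intro h
  have : n ^^^ (n ^^^ 1) = n ^^^ n := by rw [h]
  simp [-Nat.xor_assoc] at this

lemma bxor_one_ne (t : Int) : PySem.Int.bxor t 1 ≠ t := by
  by_cases h : 0 ≤ t
  · have h1 : PySem.Int.bxor t 1 = ((t.toNat ^^^ 1 : Nat) : Int) := by
      simp [PySem.Int.bxor, h]
    rw [h1]
    intro he
    have := nat_xor_one_ne t.toNat
    omega
  · have h1 : PySem.Int.bxor t 1 = -(((-t - 1).toNat ^^^ 1 : Nat) : Int) - 1 := by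
      simp [PySem.Int.bxor, h]
    rw [h1]
    intro he
    have := nat_xor_one_ne (-t - 1).toNat
    omega

-- The loop list: when a//b < 2 the range is [] (a//b ≤ 0) or [1] (a//b = 1).
lemma range_of_q_le_zero (q : Int) (h : q ≤ 0) : PySem.List.pyRange 1 (q + 1) 1 = [] :=
  PySem.List.pyRange_one_eq_nil (by omega)

-- Every value of qushiziIter is its turn argument or that turn xor 1.
lemma iter_mem (fuel : Nat) (a b turn : Int) :
    qushiziIter fuel a b turn = turn ∨ qushiziIter fuel a b turn = PySem.Int.bxor turn 1 := by
  induction fuel generalizing a b turn with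
  | zero => left; rfl
  | succ n ih =>
    by_cases h1 : a = 0 ∨ b = 0 ∨ a = b
    · simp [qushiziIter, h1]
    simp only [qushiziIter, if_neg h1]
    set p := if b > a then (b, a) else (a, b) with hp
    set q := PySem.Int.floordiv p.1 p.2 with hq
    by_cases h3 : q ≥ 2
    · rw [if_pos h3]; left; rfl
    rw [if_neg h3]
    by_cases h4 : q ≤ 0
    · rw [if_pos h4]; right; rfl
    rw [if_neg h4]
    rcases ih (p.1 - p.2) p.2 (PySem.Int.bxor turn 1) with h | h
    · rw [h]; right; rfl
    · rw [h, bxor_one_bxor_one]; left; rfl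

-- The two fueled programs agree step for step.
lemma fuel_eq (fuel : Nat) (a b turn : Int) :
    qushiziF fuel a b turn = qushiziIter fuel a b turn := by
  induction fuel generalizing a b turn with
  | zero => rfl
  | succ n ih =>
    by_cases h1 : a = 0 ∨ b = 0
    · have h1' : a = 0 ∨ b = 0 ∨ a = b := by tauto
      simp only [qushiziF, qushiziIter, if_pos h1, if_pos h1']
    by_cases h2 : a = b
    · have h1' : a = 0 ∨ b = 0 ∨ a = b := by tauto
      simp only [qushiziF, qushiziIter, if_neg h1, if_pos h2, if_pos h1']
    have h1' : ¬ (a = 0 ∨ b = 0 ∨ a = b) := by tauto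
    simp only [qushiziF, qushiziIter, if_neg h1, if_neg h2, if_neg h1']
    set p := if b > a then (b, a) else (a, b) with hp
    set q := PySem.Int.floordiv p.1 p.2 with hq
    by_cases h3 : q ≥ 2
    · rw [if_pos h3, if_pos h3]
    rw [if_neg h3, if_neg h3]
    by_cases h4 : q ≤ 0
    · rw [if_pos h4, range_of_q_le_zero q h4]; rfl
    rw [if_neg h4]
    have hq1 : q = 1 := by omega
    rw [hq1, PySem.List.pyRange_one_singleton]
    simp only [qushiziGo, one_mul]
    rw [ih]
    rcases iter_mem n (p.1 - p.2) p.2 (PySem.Int.bxor turn 1) with h | h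
    · rw [h, if_neg (bxor_one_ne turn)]
    · rw [h, bxor_one_bxor_one, if_pos rfl]

-- ===== VERDICT (by name: the statement is the Claim_ definition above) =====
theorem qushizi_spec : Claim_equal_qushizi := by
  intro a b turn _
  unfold Spec_qushizi qushizi qushizi_alt
  exact fuel_eq _ a b turn
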